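-- pv_equiv track=rewrite | github.com/SzakKrzak/ex10_pbio | zad3/s29787_zadanie3.py | transform
-- ===== SOURCE A (Python) =====
-- def transform(mtrix):
--     transf = []
--     max_len = max(len(row) for row in mtrix)
--
--     for i in range(max_len):
--         lisr = []
--         for j in range(len(mtrix)):
--             if i < len(mtrix[j]):
--                 lisr.append(mtrix[j][i])
--         transf.append(lisr)
--     return transf
-- ===== SOURCE B (Python) =====
-- def transform(mtrix):
--     max_len = max(len(row) for row in mtrix)
--     result = [[] for _ in range(max_len)]
--     for row in mtrix:
--         for i, v in enumerate(row):
--             result[i].append(v)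
--     return result
-- ===== Notes on version B (the rewrite author's own statement) =====
-- stated objective: alternative
-- what changed: Replaced A's column-outer loop (which rescans every row per column index with a bounds check) by a single row-major pass that appends each element into preallocated per-column buckets.
import Mathlib
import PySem

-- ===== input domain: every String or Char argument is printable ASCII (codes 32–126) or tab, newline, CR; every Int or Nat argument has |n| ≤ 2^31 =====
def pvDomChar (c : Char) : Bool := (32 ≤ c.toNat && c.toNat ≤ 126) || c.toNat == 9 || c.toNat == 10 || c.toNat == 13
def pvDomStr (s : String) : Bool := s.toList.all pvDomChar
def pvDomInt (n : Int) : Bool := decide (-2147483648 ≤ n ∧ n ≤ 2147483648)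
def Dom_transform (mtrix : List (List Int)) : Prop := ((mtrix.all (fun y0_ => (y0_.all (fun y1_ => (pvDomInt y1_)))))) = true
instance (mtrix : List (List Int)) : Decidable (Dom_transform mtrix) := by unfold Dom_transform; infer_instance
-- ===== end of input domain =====

-- B transposes the jagged matrix in one row-major pass into preallocated per-column buckets,
-- instead of A's column-outer rescans of all rows with a bounds check (alternative decomposition, not claimed faster).

-- ===== PORT A =====
-- A's inner loop 'for j in range(len(mtrix)): … mtrix[j] …' visits the rows in order; it is
-- ported as a fold over the rows themselves.  'mtrix[j][i]' is ported with pyGet?; the guard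
-- 'i < len(row)' makes it in range, so the .getD 0 default is never used (exact).
def transform (mtrix : List (List Int)) : List (List Int) :=
  match PySem.List.max? (mtrix.map (fun row => (row.length : Int))) (fun x => x) with
  | none => []  -- Python: max() raises ValueError on an empty matrix; excluded by Pre_
  | some maxLen =>
      (PySem.List.pyRange 0 maxLen 1).foldl
        (fun transf i =>
          transf ++ [mtrix.foldl
            (fun lisr row =>
              if i < (row.length : Int) then lisr ++ [(PySem.List.pyGet? row i).getD 0] else lisr)
            []])
        []

-- ===== PORT B =====
-- 'for i, v in enumerate(row): result[i].append(v)'; the enumerate index is ≥ 0, so .toNat is exact.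
def pvAddRow (res : List (List Int)) (row : List Int) : List (List Int) :=
  (PySem.List.enumerate row).foldl
    (fun r iv => r.modify iv.1.toNat (fun c => c ++ [iv.2])) res

def transform_alt (mtrix : List (List Int)) : List (List Int) :=
  match PySem.List.max? (mtrix.map (fun row => (row.length : Int))) (fun x => x) with
  | none => []  -- Python: max() raises ValueError on an empty matrix; excluded by Pre_
  | some maxLen =>
      mtrix.foldl pvAddRow ((PySem.List.pyRange 0 maxLen 1).map (fun _ => ([] : List Int)))

-- ===== PRECONDITION & SPEC =====
-- Pre_ excludes only the empty matrix, on which both Pythons raise ValueError (max() of an empty sequence).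
def Pre_transform (mtrix : List (List Int)) : Prop := mtrix ≠ []
instance (mtrix : List (List Int)) : Decidable (Pre_transform mtrix) := by unfold Pre_transform; infer_instance
def pvWitness_transform : List (List Int) := [[1, 2, 3], [4], [], [5, 6]]
def Spec_transform (mtrix : List (List Int)) (out : List (List Int)) : Prop := out = transform_alt mtrix
instance (mtrix : List (List Int)) (out : List (List Int)) : Decidable (Spec_transform mtrix out) := by unfold Spec_transform; infer_instance

-- ===== CLAIM (what is proved, stated in full; the proofs are below) =====
def Claim_equal_transform : Prop := ∀ (mtrix : List (List Int)), Dom_transform mtrix → Pre_transform mtrix → Spec_transform mtrix (transform mtrix)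

-- ===== LEMMAS AND PROOFS =====

-- column k of the jagged matrix, in row order
def pvCol (m : List (List Int)) (k : Nat) : List Int := m.filterMap (fun row => row[k]?)

theorem pv_map_getD_range (l : List (List Int)) :
    (List.range l.length).map (fun k => l.getD k []) = l := by
  apply List.ext_getElem
  · simp
  · intro i h1 h2
    simp [List.getD_eq_getElem?_getD, List.getElem?_eq_getElem h2]

theorem pv_enum_fold (r : List Int) : ∀ (s : Nat) (init : List (List Int)),
    s + r.length ≤ init.length →
    (PySem.List.enumerate r (s : Int)).foldl
        (fun rr iv => rr.modify iv.1.toNat (fun c => c ++ [iv.2])) init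
      = (List.range init.length).map
          (fun k => init.getD k [] ++ (if s ≤ k then (r[k - s]?).toList else [])) := by
  induction r with
  | nil =>
      intro s init _
      simp [PySem.List.enumerate]
      exact (pv_map_getD_range init).symm
  | cons v t ih =>
      intro s init hlen
      rw [PySem.List.enumerate_cons]
      have hcast : ((s : Int) + 1) = ((s + 1 : Nat) : Int) := by push_cast; ring
      rw [List.foldl_cons, hcast]
      have hs : s < init.length := by simp at hlen; omega
      have hlen' : (s + 1) + t.length ≤ (init.modify s (fun c => c ++ [v])).length := by
        rw [List.length_modify]; simp at hlen ⊢; omega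
      rw [show ((s : Int)).toNat = s from by simp]
      rw [ih (s + 1) _ hlen']
      rw [List.length_modify]
      apply List.map_congr_left
      intro k hk
      rw [List.mem_range] at hk
      have hget : (init.modify s (fun c => c ++ [v])).getD k []
          = if s = k then init.getD k [] ++ [v] else init.getD k [] := by
        rw [List.getD_eq_getElem?_getD, List.getD_eq_getElem?_getD, List.getElem?_modify,
          List.getElem?_eq_getElem hk]
        by_cases h : s = k <;> simp [h]
      rw [hget]
      by_cases h1 : s = k
      · subst h1
        simp
      · by_cases h2 : s ≤ k
        · have h3 : s + 1 ≤ k := by omega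
          have h4 : k - s = (k - (s + 1)) + 1 := by omega
          simp [h1, h2, h3, h4]
        · have h3 : ¬ s + 1 ≤ k := by omega
          simp [h1, h2, h3]

theorem pvAddRow_spec (init : List (List Int)) (r : List Int) (h : r.length ≤ init.length) :
    pvAddRow init r = (List.range init.length).map (fun k => init.getD k [] ++ (r[k]?).toList) := by
  unfold pvAddRow
  rw [show (0 : Int) = ((0 : Nat) : Int) from rfl]
  rw [pv_enum_fold r 0 init (by omega)]
  simp

theorem pv_foldl_addRow (m : List (List Int)) : ∀ (init : List (List Int)),
    (∀ row ∈ m, row.length ≤ init.length) →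
    m.foldl pvAddRow init
      = (List.range init.length).map (fun k => init.getD k [] ++ pvCol m k) := by
  induction m with
  | nil =>
      intro init _
      simp [pvCol]
      exact (pv_map_getD_range init).symm
  | cons r t ih =>
      intro init hrows
      rw [List.foldl_cons, pvAddRow_spec init r (hrows r (by simp))]
      have hlen : ((List.range init.length).map
          (fun k => init.getD k [] ++ (r[k]?).toList)).length = init.length := by simp
      rw [ih _ (by rw [hlen]; intro row hrow; exact hrows row (by simp [hrow]))]
      rw [hlen]
      apply List.map_congr_left
      intro k hk
      rw [List.mem_range] at hk
      have : ((List.range init.length).map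
          (fun k => init.getD k [] ++ (r[k]?).toList)).getD k []
          = init.getD k [] ++ (r[k]?).toList := by
        rw [List.getD_eq_getElem?_getD, List.getElem?_map,
          List.getElem?_eq_getElem (by simpa using hk)]
        simp
      rw [this, List.append_assoc]
      congr 1
      -- pvCol (r :: t) k = (r[k]?).toList ++ pvCol t k
      unfold pvCol
      rw [List.filterMap_cons]
      cases h : r[k]? <;> simp

theorem pv_col_eq (m : List (List Int)) (k : Nat) :
    (m.filter (fun row => decide ((k : Int) < (row.length : Int)))).map
        (fun row => (PySem.List.pyGet? row (k : Int)).getD 0)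
      = pvCol m k := by
  induction m with
  | nil => simp [pvCol]
  | cons r t ih =>
      unfold pvCol
      rw [List.filterMap_cons]
      by_cases h : k < r.length
      · have : ((k : Int) < (r.length : Int)) := by exact_mod_cast h
        rw [List.filter_cons_of_pos (by simpa using this), List.map_cons,
          PySem.List.pyGet?_natCast, List.getElem?_eq_getElem h]
        simpa [pvCol] using congrArg (List.cons r[k]) ih
      · have : ¬ ((k : Int) < (r.length : Int)) := by exact_mod_cast h
        rw [List.filter_cons_of_neg (by simpa using this),
          List.getElem?_eq_none (by omega)]
        simpa [pvCol] using ih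

-- ===== VERDICT (by name: the statement is the Claim_ definition above) =====
theorem transform_spec : Claim_equal_transform := by
  intro mtrix _ _
  unfold Spec_transform transform transform_alt
  cases hmax : PySem.List.max? (mtrix.map (fun row => (row.length : Int))) (fun x => x) with
  | none => rfl
  | some M =>
      dsimp only
      have hub : ∀ row ∈ mtrix, (row.length : Int) ≤ M := by
        intro row hrow
        exact PySem.List.max?_isMax hmax _ (List.mem_map_of_mem hrow)
      -- the preallocated buckets
      set init : List (List Int) := (PySem.List.pyRange 0 M 1).map (fun _ => ([] : List Int)) with hinit
      have hlen : init.length = (M).toNat := by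
        simp [hinit, PySem.List.length_pyRange_one]
      have hrows : ∀ row ∈ mtrix, row.length ≤ init.length := by
        intro row hrow
        rw [hlen]
        have := hub row hrow
        omega
      rw [pv_foldl_addRow mtrix init hrows]
      rw [PySem.List.foldl_append_singleton_eq_map, List.nil_append]
      rw [show PySem.List.pyRange 0 M 1 = (List.range M.toNat).map (fun k => ((k : Nat) : Int)) from by
        rw [PySem.List.pyRange_one]; simp]
      rw [List.map_map, hlen]
      apply List.map_congr_left
      intro k hk
      rw [List.mem_range] at hk
      have hgetD : init.getD k [] = [] := by
        rw [List.getD_eq_getElem?_getD, hinit, List.getElem?_map,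
          List.getElem?_eq_getElem (by simpa [PySem.List.length_pyRange_one] using hk)]
        simp
      rw [hgetD, List.nil_append]
      simpa using (by
        have := pv_col_eq mtrix k
        simpa [PySem.List.foldl_append_ite] using
          (PySem.List.foldl_append_ite (fun row : List Int => (k : Int) < (row.length : Int))
            (fun row => (PySem.List.pyGet? row (k : Int)).getD 0) mtrix []).trans
            (by simpa using this))
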